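-- pv_equiv track=rewrite | github.com/luoyangxi0912/AE-CS- | joff/_load/_split.py | _v2l
-- ===== SOURCE A (Python) =====
-- def _v2l(v, seg_len, if_need_accu = True):
--     if if_need_accu:
--         seg_len = seg_len.copy()
--         for i in range(1, len(seg_len)):
--             seg_len[i] += seg_len[i-1]
--         seg_len.insert(0, 0)
--     l = []
--     for i in range(1, len(seg_len)):
--         l.append(v[seg_len[i-1]: seg_len[i]])
--     return l
-- ===== SOURCE B (Python) =====
-- def _v2l(v, seg_len, if_need_accu = True):
--     if if_need_accu:
--         out = []
--         start = 0
--         for length in seg_len: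
--             out.append(v[start:start + length])
--             start += length
--         return out
--     return [v[a:b] for a, b in zip(seg_len, seg_len[1:])]
-- ===== Notes on version B (the rewrite author's own statement) =====
-- stated objective: simpler
-- what changed: Replaces A's build-cumulative-list-then-slice two-pass structure by a single running-offset pass (accu mode) and a paired-boundary zip comprehension (boundary mode); no intermediate cumulative list is ever built.
import Mathlib
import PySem

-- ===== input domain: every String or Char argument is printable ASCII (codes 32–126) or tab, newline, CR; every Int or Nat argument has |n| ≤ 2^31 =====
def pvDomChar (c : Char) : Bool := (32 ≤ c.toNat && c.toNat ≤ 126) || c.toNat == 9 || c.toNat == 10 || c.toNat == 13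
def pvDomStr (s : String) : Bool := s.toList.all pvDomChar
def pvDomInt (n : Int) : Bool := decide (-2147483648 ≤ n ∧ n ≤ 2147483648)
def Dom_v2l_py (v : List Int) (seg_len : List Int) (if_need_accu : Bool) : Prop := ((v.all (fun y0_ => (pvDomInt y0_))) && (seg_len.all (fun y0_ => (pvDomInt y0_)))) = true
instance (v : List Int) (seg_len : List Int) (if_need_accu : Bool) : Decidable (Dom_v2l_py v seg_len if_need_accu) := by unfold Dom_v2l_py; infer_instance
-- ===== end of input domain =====

-- B replaces A's accumulate-then-slice two passes by one running-offset pass (accu mode)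
-- and a paired-boundary zip pass (boundary mode); same results, simpler (no cumulative list).

-- ===== PORT A =====
-- seg_len[i] += seg_len[i-1]  (one step of A's in-place prefix-sum loop)
def v2l_accuStep (s : List Int) (i : Nat) : List Int :=
  s.set i (s.getD i 0 + s.getD (i - 1) 0)

def v2l_py (v : List Int) (seg_len : List Int) (if_need_accu : Bool) : List (List Int) :=
  -- if if_need_accu: prefix-sum loop over range(1, len), then insert 0 at the front
  let sl := if if_need_accu then
      0 :: (List.range' 1 (seg_len.length - 1)).foldl v2l_accuStep seg_len
    else seg_len
  -- for i in range(1, len(sl)): l.append(v[sl[i-1]:sl[i]])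
  (List.range' 1 (sl.length - 1)).foldl
    (fun l i => l ++ [PySem.List.slice v (some (sl.getD (i - 1) 0)) (some (sl.getD i 0))]) []

-- ===== PORT B =====
-- running-offset loop: append v[start:start+L], start += L
def v2l_goB (v : List Int) : List Int → Int → List (List Int)
  | [], _ => []
  | L :: rest, start =>
      PySem.List.slice v (some start) (some (start + L)) :: v2l_goB v rest (start + L)

def v2l_py_alt (v : List Int) (seg_len : List Int) (if_need_accu : Bool) : List (List Int) :=
  if if_need_accu then
    v2l_goB v seg_len 0
  else
    (seg_len.zip seg_len.tail).map (fun p => PySem.List.slice v (some p.1) (some p.2))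

-- ===== PRECONDITION & SPEC =====
def Spec_v2l_py (v : List Int) (seg_len : List Int) (if_need_accu : Bool) (out : List (List Int)) : Prop := out = v2l_py_alt v seg_len if_need_accu
instance (v : List Int) (seg_len : List Int) (if_need_accu : Bool) (out : List (List Int)) : Decidable (Spec_v2l_py v seg_len if_need_accu out) := by unfold Spec_v2l_py; infer_instance

-- ===== CLAIM (what is proved, stated in full; the proofs are below) =====
def Claim_equal_v2l_py : Prop := ∀ (v : List Int) (seg_len : List Int) (if_need_accu : Bool), Dom_v2l_py v seg_len if_need_accu → Spec_v2l_py v seg_len if_need_accu (v2l_py v seg_len if_need_accu)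

-- ===== LEMMAS AND PROOFS =====

-- prefix sums of t starting from c (no initial element)
def v2l_psums : List Int → Int → List Int
  | [], _ => []
  | L :: t, c => (c + L) :: v2l_psums t (c + L)

-- a fold of "append one slice per consecutive pair of sl" is the map over the zipped pairs
theorem v2l_pairs (f : Int → Int → List Int) :
    ∀ (t : List Int) (x : Int),
      (List.range' 1 t.length).foldl
        (fun l i => l ++ [f ((x :: t).getD (i - 1) 0) ((x :: t).getD i 0)]) []
      = (List.zip (x :: t) t).map (fun p => f p.1 p.2) := by
  intro t
  induction t with
  | nil => intro x; simp
  | cons b t' ih =>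
    intro x
    have hr : List.range' 1 (b :: t').length
        = 1 :: (List.range' 1 t'.length).map (fun a => 1 + a) := by
      rw [show (b :: t').length = t'.length + 1 from rfl, List.range'_succ,
        List.map_add_range']
    rw [hr]
    simp only [PySem.List.foldl_append_singleton_eq_map, List.map_cons, List.map_map,
      List.nil_append]
    rw [show List.zip (x :: b :: t') (b :: t') = (x, b) :: List.zip (b :: t') t' from rfl,
      List.map_cons]
    have hcongr : ((List.range' 1 t'.length).map
        ((fun i => f ((x :: b :: t').getD (i - 1) 0) ((x :: b :: t').getD i 0))
          ∘ (fun a => 1 + a)))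
        = (List.range' 1 t'.length).map
          (fun i => f ((b :: t').getD (i - 1) 0) ((b :: t').getD i 0)) := by
      apply List.map_congr_left
      intro a ha
      have h1 : 1 ≤ a := by
        obtain ⟨i, hi, rfl⟩ := List.mem_range'.1 ha; omega
      obtain ⟨k, rfl⟩ : ∃ k, a = k + 1 := ⟨a - 1, by omega⟩
      have h2 : 1 + (k + 1) = k + 1 + 1 := by omega
      simp [Function.comp, h2]
    rw [hcongr]
    have htail := ih b
    simp only [PySem.List.foldl_append_singleton_eq_map, List.nil_append] at htail
    rw [htail]
    simp

-- B's running-offset loop produces exactly the slices between consecutive prefix sums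
theorem v2l_goB_eq (v : List Int) :
    ∀ (a : List Int) (s : Int),
      v2l_goB v a s
      = (List.zip (s :: v2l_psums a s) (v2l_psums a s)).map
          (fun p => PySem.List.slice v (some p.1) (some p.2)) := by
  intro a
  induction a with
  | nil => intro s; simp [v2l_goB, v2l_psums]
  | cons L rest ih =>
    intro s
    simp only [v2l_goB, v2l_psums, List.zip_cons_cons, List.map_cons]
    rw [ih (s + L)]

-- A's in-place prefix-sum loop, generalized over an already-processed prefix p ++ [c]
theorem v2l_accu_gen :
    ∀ (t p : List Int) (c : Int),
      (List.range' (p.length + 1) t.length).foldl v2l_accuStep (p ++ c :: t)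
      = p ++ c :: v2l_psums t c := by
  intro t
  induction t with
  | nil => intro p c; simp [v2l_psums]
  | cons L t' ih =>
    intro p c
    rw [show (L :: t').length = t'.length + 1 from rfl, List.range'_succ]
    rw [List.foldl_cons]
    have hget1 : (p ++ c :: L :: t').getD (p.length + 1) 0 = L := by
      simp [List.getD_eq_getElem?_getD]
    have hget0 : (p ++ c :: L :: t').getD (p.length + 1 - 1) 0 = c := by
      simp [List.getD_eq_getElem?_getD]
    have hset : (p ++ c :: L :: t').set (p.length + 1) (L + c) = (p ++ [c]) ++ (c + L) :: t' := by
      rw [show p ++ c :: L :: t' = (p ++ [c]) ++ L :: t' by simp]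
      rw [List.set_append_right _ _ (by simp)]
      simp [add_comm]
    rw [show v2l_accuStep (p ++ c :: L :: t') (p.length + 1)
          = (p ++ [c]) ++ (c + L) :: t' by
        unfold v2l_accuStep; rw [hget1, hget0, hset]]
    have := ih (p ++ [c]) (c + L)
    rw [show (p ++ [c]).length + 1 = p.length + 1 + 1 by simp] at this
    rw [this]
    simp [v2l_psums]

-- A's full prefix-sum pass on x :: t is x followed by the prefix sums from x
theorem v2l_accu (x : Int) (t : List Int) :
    (List.range' 1 t.length).foldl v2l_accuStep (x :: t) = x :: v2l_psums t x := by
  have := v2l_accu_gen t [] x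
  simpa using this

-- ===== VERDICT (by name: the statement is the Claim_ definition above) =====
theorem v2l_py_spec : Claim_equal_v2l_py := by
  intro v seg_len if_need_accu _
  unfold Spec_v2l_py v2l_py v2l_py_alt
  cases if_need_accu with
  | false =>
    simp only [Bool.false_eq_true, if_false]
    cases seg_len with
    | nil => rfl
    | cons x t =>
      rw [show (x :: t).length - 1 = t.length from rfl,
        v2l_pairs (fun a b => PySem.List.slice v (some a) (some b)) t x]
      rfl
  | true =>
    simp only [if_true]
    cases seg_len with
    | nil => rfl
    | cons x t =>
      rw [show (x :: t).length - 1 = t.length from rfl, v2l_accu x t,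
        show (0 :: x :: v2l_psums t x).length - 1 = (x :: v2l_psums t x).length from rfl,
        v2l_pairs (fun a b => PySem.List.slice v (some a) (some b)) (x :: v2l_psums t x) 0,
        v2l_goB_eq v (x :: t) 0]
      simp [v2l_psums]
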